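-- pv_equiv track=rewrite | github.com/6210qwe/spider_tool | spider_tools/parse_file.py | get_data_end_text
-- ===== SOURCE A (Python) =====
-- def rtrim_list(lst):
--     """
--     去除列表后边的空内容
--     :param lst:
--     :return:
--     """
--     def is_empty(x):
--         return x is None or (isinstance(x, str) and x.strip() == "")
--
--     end = len(lst) - 1
--     while end >= 0 and is_empty(lst[end]):
--         end -= 1
--
--     return lst[:end + 1]
--
-- def get_data_end_text(data,header_index):
--     rtrim_list_data = [rtrim_list(d) for d in data[header_index:]]
--     end_data = []
--     end_index = 0
--     for index,d in enumerate(rtrim_list_data[::-1]):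
--         if len(d)==1:
--             end_data.append(d[0])
--         else:
--             end_index = -index
--             return ','.join(end_data[::-1]),end_index
--     return ','.join(end_data[::-1]),end_index
-- ===== SOURCE B (Python) =====
-- def rtrim_list(lst):
--     """
--     去除列表后边的空内容
--     :param lst:
--     :return:
--     """
--     def is_empty(x):
--         return x is None or (isinstance(x, str) and x.strip() == "")
--
--     end = len(lst) - 1
--     while end >= 0 and is_empty(lst[end]):
--         end -= 1
--
--     return lst[:end + 1]
--
-- def get_data_end_text(data, header_index):
--     rtrim_list_data = [rtrim_list(d) for d in data[header_index:]]
--     # one forward pass: largest index whose row is not single-column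
--     last_non_single = -1
--     for i, d in enumerate(rtrim_list_data):
--         if len(d) != 1:
--             last_non_single = i
--     block = rtrim_list_data[last_non_single + 1:]
--     text = ','.join(d[0] for d in block)
--     if last_non_single == -1:
--         end_index = 0
--     else:
--         end_index = -(len(rtrim_list_data) - 1 - last_non_single)
--     return text, end_index
-- ===== Notes on version B (the rewrite author's own statement) =====
-- stated objective: alternative
-- what changed: A iterates over a reversed copy of the rtrimmed rows accumulating single-column cells until it breaks; B makes one forward pass recording the last non-single-column row index and then slices off the trailing block and joins it, computing the index by arithmetic.
import Mathlib
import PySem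

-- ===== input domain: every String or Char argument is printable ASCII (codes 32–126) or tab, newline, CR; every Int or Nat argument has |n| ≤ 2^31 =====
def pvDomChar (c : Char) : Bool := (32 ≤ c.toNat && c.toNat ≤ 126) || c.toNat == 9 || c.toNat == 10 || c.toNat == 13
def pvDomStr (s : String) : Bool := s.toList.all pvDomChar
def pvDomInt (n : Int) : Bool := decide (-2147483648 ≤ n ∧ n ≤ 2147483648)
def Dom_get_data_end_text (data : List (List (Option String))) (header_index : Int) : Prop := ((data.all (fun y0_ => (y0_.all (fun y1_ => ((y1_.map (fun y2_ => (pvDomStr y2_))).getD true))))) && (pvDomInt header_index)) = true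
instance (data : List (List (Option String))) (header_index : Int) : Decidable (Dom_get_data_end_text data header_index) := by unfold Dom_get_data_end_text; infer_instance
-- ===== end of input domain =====

-- B replaces A's reversed-iteration break loop by one forward pass recording the last
-- non-single-column row and slicing the trailing block (same result, alternative decomposition).

-- ===== PORT A =====
-- is_empty(x) inside rtrim_list
def pvIsEmpty (x : Option String) : Bool :=
  match x with
  | none => true
  | some s => PySem.Str.strip s == ""

-- 'end = len(lst)-1; while end >= 0 and is_empty(lst[end]): end -= 1'; argument is end+1 as a Nat
def pvRtrimEnd (lst : List (Option String)) : Nat → Nat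
  | 0 => 0
  | k + 1 => if pvIsEmpty (lst.getD k none) then pvRtrimEnd lst k else k + 1

-- rtrim_list (shared helper: B's Python keeps rtrim_list verbatim)
def pvRtrim (lst : List (Option String)) : List (Option String) :=
  lst.take (pvRtrimEnd lst lst.length)

-- d[0]; the '_ => ""' arms are unreachable (only called on singleton rtrim outputs, whose
-- element is a non-empty string), so this is exact where either Python evaluates d[0]
def pvExtract (d : List (Option String)) : String :=
  match d with
  | some s :: _ => s
  | _ => ""

-- A's 'for index,d in enumerate(rtrim_list_data[::-1]): …'
def pvALoop (l : List (List (Option String))) (idx : Nat) (acc : List String) : List String × Int :=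
  match l with
  | [] => (acc, 0)
  | d :: rest =>
    if d.length == 1 then pvALoop rest (idx + 1) (acc ++ [pvExtract d])
    else (acc, -(idx : Int))

def get_data_end_text (data : List (List (Option String))) (header_index : Int) : String × Int :=
  let rld := (PySem.List.slice data (some header_index) none).map pvRtrim
  let r := pvALoop rld.reverse 0 []
  (PySem.Str.join "," r.1.reverse, r.2)

-- ===== PORT B =====
-- forward pass: last_non_single (-1 if none)
def pvLastNS (rld : List (List (Option String))) : Int :=
  (PySem.List.enumerate rld 0).foldl
    (fun acc p => if p.2.length ≠ 1 then p.1 else acc) (-1)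

def get_data_end_text_alt (data : List (List (Option String))) (header_index : Int) : String × Int :=
  let rld := (PySem.List.slice data (some header_index) none).map pvRtrim
  let last := pvLastNS rld
  let block := PySem.List.slice rld (some (last + 1)) none
  (PySem.Str.join "," (block.map pvExtract),
   if last == -1 then 0 else -((rld.length : Int) - 1 - last))

-- ===== PRECONDITION & SPEC =====
def Spec_get_data_end_text (data : List (List (Option String))) (header_index : Int) (out : String × Int) : Prop := out = get_data_end_text_alt data header_index
instance (data : List (List (Option String))) (header_index : Int) (out : String × Int) : Decidable (Spec_get_data_end_text data header_index out) := by unfold Spec_get_data_end_text; infer_instance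

-- ===== CLAIM (what is proved, stated in full; the proofs are below) =====
def Claim_equal_get_data_end_text : Prop := ∀ (data : List (List (Option String))) (header_index : Int), Dom_get_data_end_text data header_index → Spec_get_data_end_text data header_index (get_data_end_text data header_index)

-- ===== LEMMAS AND PROOFS =====

-- index of the first non-single row (proof-side characterisation)
def pvBrk : List (List (Option String)) → Option Nat
  | [] => none
  | d :: rest => if d.length == 1 then (pvBrk rest).map (· + 1) else some 0

theorem pvALoop_spec (l : List (List (Option String))) (idx : Nat) (acc : List String) :
    pvALoop l idx acc =
      (acc ++ (l.takeWhile (fun d => d.length == 1)).map pvExtract,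
       match pvBrk l with
       | none => 0
       | some j => -((idx : Int) + j)) := by
  induction l generalizing idx acc with
  | nil => simp [pvALoop, pvBrk]
  | cons d rest ih =>
    by_cases h : d.length = 1
    · simp [pvALoop, pvBrk, h, ih]
      cases hb : pvBrk rest with
      | none => simp
      | some j => simp; ring
    · simp [pvALoop, pvBrk, h]

theorem pvBrk_lt (l : List (List (Option String))) (j : Nat) (h : pvBrk l = some j) :
    j < l.length := by
  induction l generalizing j with
  | nil => simp [pvBrk] at h
  | cons d rest ih =>
    by_cases hd : d.length = 1
    · simp [pvBrk, hd] at h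
      cases hb : pvBrk rest with
      | none => rw [hb] at h; simp at h
      | some j' =>
        rw [hb] at h; simp at h
        have := ih j' hb
        simp only [List.length_cons]
        omega
    · simp [pvBrk, hd] at h
      simp only [List.length_cons]
      omega

theorem pvBrk_none_takeWhile (l : List (List (Option String))) (h : pvBrk l = none) :
    l.takeWhile (fun d => d.length == 1) = l := by
  induction l with
  | nil => simp
  | cons d rest ih =>
    by_cases hd : d.length = 1
    · simp [pvBrk, hd] at h
      cases hb : pvBrk rest with
      | some j' => rw [hb] at h; simp at h
      | none => simp [hd, ih hb]
    · simp [pvBrk, hd] at h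

theorem pvBrk_takeWhile (l : List (List (Option String))) (j : Nat) (h : pvBrk l = some j) :
    l.takeWhile (fun d => d.length == 1) = l.take j := by
  induction l generalizing j with
  | nil => simp [pvBrk] at h
  | cons d rest ih =>
    by_cases hd : d.length = 1
    · simp [pvBrk, hd] at h
      cases hb : pvBrk rest with
      | none => rw [hb] at h; simp at h
      | some j' =>
        rw [hb] at h; simp at h
        subst h
        simp [hd, ih j' hb]
    · simp [pvBrk, hd] at h
      subst h
      simp [hd]

-- B's forward fold computes length - 1 - (first non-single index of the reverse)
theorem pvLastNS_spec (rld : List (List (Option String))) :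
    pvLastNS rld =
      match pvBrk rld.reverse with
      | none => -1
      | some j => (rld.length : Int) - 1 - j := by
  induction rld using List.reverseRecOn with
  | nil => simp [pvLastNS, pvBrk, PySem.List.enumerate_nil]
  | append_singleton xs d ih =>
    have hL : pvLastNS (xs ++ [d]) =
        if d.length ≠ 1 then ((0 : Int) + xs.length) else pvLastNS xs := by
      rw [pvLastNS, PySem.List.enumerate_append, List.foldl_append,
        PySem.List.enumerate_cons, PySem.List.enumerate_nil, List.foldl_cons, List.foldl_nil]
      rfl
    have hB : pvBrk ((xs ++ [d]).reverse) =
        if d.length == 1 then (pvBrk xs.reverse).map (· + 1) else some 0 := by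
      simp [pvBrk]
    rw [hL, hB]
    by_cases hd : d.length = 1
    · simp only [hd, ne_eq, not_true_eq_false, if_false, beq_self_eq_true, if_true, ih]
      cases hb : pvBrk xs.reverse with
      | none => simp
      | some j =>
        have hj : j < xs.length := by simpa using pvBrk_lt _ _ hb
        simp only [Option.map_some, List.length_append, List.length_cons, List.length_nil]
        push_cast
        ring
    · simp [hd]

theorem key (rld : List (List (Option String))) :
    (PySem.Str.join "," (pvALoop rld.reverse 0 []).1.reverse, (pvALoop rld.reverse 0 []).2)
      = (PySem.Str.join "," ((PySem.List.slice rld (some (pvLastNS rld + 1)) none).map pvExtract),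
         if pvLastNS rld == -1 then 0 else -((rld.length : Int) - 1 - pvLastNS rld)) := by
  rw [pvALoop_spec, pvLastNS_spec]
  cases hb : pvBrk rld.reverse with
  | none =>
    simp only []
    rw [pvBrk_none_takeWhile _ hb]
    simp [List.map_reverse]
  | some j =>
    have hj : j < rld.length := by have := pvBrk_lt _ _ hb; simpa using this
    simp only []
    rw [pvBrk_takeWhile _ _ hb]
    have hlast : ((rld.length : Int) - 1 - j) + 1 = ((rld.length - 1 - j + 1 : Nat) : Int) := by
      push_cast; omega
    have hslice : PySem.List.slice rld (some ((rld.length : Int) - 1 - j + 1)) none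
        = rld.drop (rld.length - 1 - j + 1) := by
      rw [hlast, PySem.List.slice_from_natCast]
    have hrev : (rld.reverse.take j).reverse = rld.drop (rld.length - j) := by
      rw [← List.reverse_reverse rld, List.reverse_reverse (rld.reverse)]
      rw [List.take_reverse]
      simp
    have hne : ((rld.length : Int) - 1 - j == -1) = false := by
      simp only [beq_eq_false_iff_ne, ne_eq]
      omega
    rw [hslice, hne]
    have hidx : rld.length - 1 - j + 1 = rld.length - j := by omega
    rw [hidx, ← hrev]
    simp only [List.nil_append, List.map_reverse, Prod.mk.injEq, Bool.false_eq_true, if_false]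
    exact ⟨trivial, by push_cast; ring⟩

-- ===== VERDICT (by name: the statement is the Claim_ definition above) =====
theorem get_data_end_text_spec : Claim_equal_get_data_end_text := by
  intro data header_index _
  unfold Spec_get_data_end_text get_data_end_text get_data_end_text_alt
  exact key _
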